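-- pv_equiv track=rewrite | github.com/zxmeng/LeetCode | dynamic_program/climbingStaircase.py | climbingStaircase
-- ===== SOURCE A (Python) =====
-- def climbingStaircase(n, k):
--     if n == 0:
--         return [[]]
--     if k == 0:
--         return [[]]
--
--     re = {0:[[]], 1:[[1]]}
--     for i in range(2, n+1):
--         re[i] = []
--         for j in range(1, min(k, i)+1):
--             re[i] += [el + [j] for el in re[i-j]]
--
--     return sorted(re[n])
-- ===== SOURCE B (Python) =====
-- def climbingStaircase(n, k):
--     if n == 0:
--         return [[]]
--     if k == 0:
--         return [[]]
--     res = []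
--     stack = [(n, [])]
--     while stack:
--         rem, pre = stack.pop()
--         if rem == 0:
--             res.append(pre)
--         else:
--             for j in range(min(k, rem), 0, -1):
--                 stack.append((rem - j, pre + [j]))
--     return res
-- ===== Notes on version B (the rewrite author's own statement) =====
-- stated objective: alternative
-- what changed: A fills a bottom-up dict DP table of compositions split on the LAST step and sorts the final entry; B runs an iterative depth-first search with an explicit stack, pushing candidate first steps so the smallest is explored first, so the sequences are emitted already in lexicographic order with no table and no sort.
-- intended difference: On n = 1 with k < 0, A returns [[1]] (an artefact of pre-seeding its table with re[1]=[[1]] before checking k), while B returns [], the intended value since no step sizes exist when k < 0 (A itself returns [] for every n >= 2 with k < 0). — e.g. on climbingStaircase(1, -1): A returns [[1]], B returns []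
import Mathlib
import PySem

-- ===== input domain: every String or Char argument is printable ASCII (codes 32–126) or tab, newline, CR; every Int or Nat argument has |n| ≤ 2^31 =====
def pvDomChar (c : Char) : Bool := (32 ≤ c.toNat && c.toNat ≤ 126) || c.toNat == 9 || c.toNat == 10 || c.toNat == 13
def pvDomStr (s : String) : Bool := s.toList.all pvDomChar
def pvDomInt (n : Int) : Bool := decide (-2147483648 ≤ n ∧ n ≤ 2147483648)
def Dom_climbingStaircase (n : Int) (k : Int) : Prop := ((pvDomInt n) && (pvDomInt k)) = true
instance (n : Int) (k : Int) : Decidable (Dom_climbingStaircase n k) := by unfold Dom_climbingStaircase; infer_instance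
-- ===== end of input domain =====

-- B replaces A's bottom-up dict DP (split on the last step) + final sort by an iterative
-- depth-first search with an explicit stack that tries the smaller step first, so the sequences
-- are emitted already in lexicographic order with no table and no sort.

-- ===== PORT A =====
-- Python: re = {0:[[]], 1:[[1]]}; for i in 2..n: re[i] = []; for j in 1..min(k,i): re[i] += [el+[j] for el in re[i-j]]; return sorted(re[n])
-- 're[i] += …' reads re[i] and re[i-j] (always present keys) → Dict.getD; the final 're[n]' raises KeyError
-- when n is absent (n < 0 with k ≠ 0) — those inputs are outside Pre_climbingStaircase, so getD is exact there.
def climbingStaircase (n : Int) (k : Int) : List (List Int) :=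
  if n = 0 then [[]]
  else if k = 0 then [[]]
  else
    let re0 : PySem.Dict Int (List (List Int)) := PySem.Dict.ofList [(0, [[]]), (1, [[1]])]
    let re := (PySem.List.pyRange 2 (n + 1) 1).foldl (fun d i =>
        (PySem.List.pyRange 1 (min k i + 1) 1).foldl
          (fun d j => d.insert i (d.getD i [] ++ (d.getD (i - j) []).map (fun el => el ++ [j])))
          (d.insert i [])) re0
    PySem.List.sorted (re.getD n []) (fun x => x) false

-- ===== PORT B =====
-- termination helpers for the stack loop (cited by name in decreasing_by):
-- the measure Σ 3^rem strictly drops on every pop (each pushed entry has a smaller rem).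
def pvStackMeasure (stack : List (Int × List Int)) : Nat :=
  (stack.map (fun p => 3 ^ p.1.toNat)).sum

theorem pvMeasure_foldl_cons (rem : Int) (pre : List Int) (l : List Int) :
    ∀ (rest : List (Int × List Int)),
      pvStackMeasure (l.foldl (fun st j => ((rem - j, pre ++ [j]) : Int × List Int) :: st) rest)
        = (l.map (fun j => 3 ^ (rem - j).toNat)).sum + pvStackMeasure rest := by
  induction l with
  | nil => intro rest; simp
  | cons a t ih =>
    intro rest
    rw [List.foldl_cons, ih]
    simp only [List.map_cons, List.sum_cons, pvStackMeasure]
    ring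

theorem pvSumPow_le (rem : Int) :
    ∀ (m : Nat), (m : Int) ≤ rem →
      ((PySem.List.pyRange (m : Int) 0 (-1)).map (fun j => 3 ^ (rem - j).toNat)).sum
        + 3 ^ (rem - (m : Int)).toNat ≤ 3 ^ rem.toNat := by
  intro m
  induction m with
  | zero =>
    intro _
    rw [PySem.List.pyRange_neg_one_eq_nil (by norm_num)]
    simp
  | succ m ih =>
    intro hm
    have hm' : (m : Int) ≤ rem := by push_cast at hm ⊢; omega
    have hih := ih hm'
    rw [show (((m + 1 : Nat)) : Int) = (m : Int) + 1 from by push_cast; ring] at hm ⊢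
    rw [PySem.List.pyRange_neg_one_cons (by omega),
        show ((m : Int) + 1 - 1) = (m : Int) from by ring]
    simp only [List.map_cons, List.sum_cons]
    have he : (rem - (m : Int)).toNat = (rem - ((m : Int) + 1)).toNat + 1 := by omega
    rw [he, pow_succ] at hih
    set x := 3 ^ (rem - ((m : Int) + 1)).toNat with hx
    omega

theorem pvSumPow_lt (k rem : Int) (h : rem ≠ 0) :
    ((PySem.List.pyRange (min k rem) 0 (-1)).map (fun j => 3 ^ (rem - j).toNat)).sum
      < 3 ^ rem.toNat := by
  by_cases hm : min k rem ≤ 0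
  · rw [PySem.List.pyRange_neg_one_eq_nil hm]
    simp only [List.map_nil, List.sum_nil]
    positivity
  · have h1 : 1 ≤ min k rem := by omega
    have hrem : 1 ≤ rem := le_trans h1 (min_le_right _ _)
    have hle := pvSumPow_le rem (min k rem).toNat (by omega)
    rw [Int.toNat_of_nonneg (by omega)] at hle
    have hp : 0 < 3 ^ (rem - min k rem).toNat := by positivity
    omega

-- Python Source B's while loop: pop (rem, pre); if rem == 0 append pre to res, else push
-- (rem-j, pre+[j]) for j = min(k,rem)..1 (so the smallest j is popped first).
-- The stack has its top at the head (list.append/pop at the end ↔ cons/head).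
def altLoop (k : Int) (stack : List (Int × List Int)) (res : List (List Int)) :
    List (List Int) :=
  match stack with
  | [] => res
  | (rem, pre) :: rest =>
    if rem = 0 then altLoop k rest (res ++ [pre])
    else altLoop k ((PySem.List.pyRange (min k rem) 0 (-1)).foldl
        (fun st j => (rem - j, pre ++ [j]) :: st) rest) res
termination_by pvStackMeasure stack
decreasing_by
  · simp only [pvStackMeasure, List.map_cons, List.sum_cons]
    have : 0 < 3 ^ rem.toNat := by positivity
    omega
  · rw [pvMeasure_foldl_cons]
    have := pvSumPow_lt k rem (by assumption)
    simp only [pvStackMeasure, List.map_cons, List.sum_cons]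
    omega

-- Python Source B: if n==0: [[]]; if k==0: [[]]; res=[]; stack=[(n,[])]; while stack: …; return res
def climbingStaircase_alt (n : Int) (k : Int) : List (List Int) :=
  if n = 0 then [[]]
  else if k = 0 then [[]]
  else altLoop k [(n, [])] []

-- ===== PRECONDITION & SPEC =====
-- Pre_ excludes exactly the inputs where Python A raises KeyError: n < 0 with k ≠ 0 (re[n] absent).
def Pre_climbingStaircase (n : Int) (k : Int) : Prop := 0 ≤ n ∨ k = 0
instance (n : Int) (k : Int) : Decidable (Pre_climbingStaircase n k) := by unfold Pre_climbingStaircase; infer_instance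
def pvWitness_climbingStaircase : Int × Int := (4, 2)

-- On n = 1 with k < 0, A returns [[1]] (an artefact of pre-seeding its table with re[1]=[[1]] before
-- checking k), while B returns [], the intended value since no step sizes exist when k < 0.
def D_climbingStaircase (n : Int) (k : Int) : Prop := n = 1 ∧ k < 0
instance (n : Int) (k : Int) : Decidable (D_climbingStaircase n k) := by unfold D_climbingStaircase; infer_instance

def Spec_climbingStaircase (n : Int) (k : Int) (out : List (List Int)) : Prop :=
  ¬ D_climbingStaircase n k → out = climbingStaircase_alt n k
instance (n : Int) (k : Int) (out : List (List Int)) : Decidable (Spec_climbingStaircase n k out) := by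
  unfold Spec_climbingStaircase; infer_instance

def pvDiffWitness_climbingStaircase : Int × Int := (1, -1)
def pvDiffWitnessOut_climbingStaircase : (List (List Int)) × (List (List Int)) := ([[1]], [])

-- ===== CLAIM (what is proved, stated in full; the proofs are below) =====
def Claim_unchanged_climbingStaircase : Prop := ∀ (n : Int) (k : Int), Dom_climbingStaircase n k → Pre_climbingStaircase n k → Spec_climbingStaircase n k (climbingStaircase n k)
def Claim_changed_climbingStaircase : Prop := Dom_climbingStaircase (pvDiffWitness_climbingStaircase.1) (pvDiffWitness_climbingStaircase.2) ∧ Pre_climbingStaircase (pvDiffWitness_climbingStaircase.1) (pvDiffWitness_climbingStaircase.2) ∧ D_climbingStaircase (pvDiffWitness_climbingStaircase.1) (pvDiffWitness_climbingStaircase.2) ∧ climbingStaircase (pvDiffWitness_climbingStaircase.1) (pvDiffWitness_climbingStaircase.2) = pvDiffWitnessOut_climbingStaircase.1 ∧ climbingStaircase_alt (pvDiffWitness_climbingStaircase.1) (pvDiffWitness_climbingStaircase.2) = pvDiffWitnessOut_climbingStaircase.2 ∧ pvDiffWitnessOut_climbingStaircase.1 ≠ pvDiffWitnessOut_climbingS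taircase.2
def Claim_exact_climbingStaircase : Prop := ∀ (n : Int) (k : Int), Dom_climbingStaircase n k → Pre_climbingStaircase n k → D_climbingStaircase n k → climbingStaircase n k ≠ climbingStaircase_alt n k

-- ===== LEMMAS AND PROOFS =====

-- proof-side specification: the compositions of rem from steps 1..k split on the FIRST step
-- taken in ascending order, i.e. in lexicographic order; B's DFS is proved equal to it.
def comps (k : Int) (rem : Int) : List (List Int) :=
  if rem = 0 then [[]]
  else
    (PySem.List.pyRange 1 (min k rem + 1) 1).attach.flatMap
      (fun j => (comps k (rem - j.1)).map (fun c => j.1 :: c))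
termination_by rem.toNat
decreasing_by
  have hm := PySem.List.mem_pyRange_one.mp j.2
  omega

-- A's table values, read off the Python loops: tbl k m = re[m].
def tbl (k : Int) : Nat → List (List Int)
  | 0 => [[]]
  | 1 => [[1]]
  | (m + 2) =>
    (PySem.List.pyRange 1 (min k ((m : Int) + 2) + 1) 1).attach.flatMap
      (fun j => (tbl k (m + 2 - j.1.toNat)).map (fun el => el ++ [j.1]))
termination_by m => m
decreasing_by
  have hm := PySem.List.mem_pyRange_one.mp j.2
  omega

-- generic: flatMap over an attached list forgets the proofs
theorem flatMap_attach' {α β : Type} (l : List α) (f : α → List β) :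
    l.attach.flatMap (fun x => f x.1) = l.flatMap f := by
  simp [List.flatMap]

-- generic: pushing a mapped list one by one is prepending its reverse
theorem foldl_cons_eq_reverse_append {α β : Type} (l : List α) (e : α → β) :
    ∀ (rest : List β), l.foldl (fun st j => e j :: st) rest = l.reverse.map e ++ rest := by
  induction l with
  | nil => intro rest; simp
  | cons a t ih => intro rest; rw [List.foldl_cons, ih]; simp

-- lex-order facts for the List Int order used by sorted
theorem lt_cons_same {a : Int} {l1 l2 : List Int} (h : l1 < l2) : (a :: l1) < (a :: l2) :=
  List.cons_lt_cons_iff.mpr (Or.inr ⟨rfl, h⟩)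

theorem lt_cons_rel {a b : Int} (h : a < b) (l1 l2 : List Int) : (a :: l1) < (b :: l2) :=
  List.cons_lt_cons_iff.mpr (Or.inl h)

-- comps is [] whenever its j-range is empty
theorem comps_empty (k rem : Int) (hr : rem ≠ 0) (h : min k rem < 1) :
    comps k rem = [] := by
  rw [comps, if_neg hr, PySem.List.pyRange_one_eq_nil (by omega)]
  rfl

-- comps unfolded to a plain flatMap
theorem comps_eq_flatMap (k rem : Int) (hr : rem ≠ 0) :
    comps k rem =
      (PySem.List.pyRange 1 (min k rem + 1) 1).flatMap
        (fun j => (comps k (rem - j)).map (fun c => j :: c)) := by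
  rw [comps, if_neg hr]
  exact flatMap_attach' (PySem.List.pyRange 1 (min k rem + 1) 1)
    (fun j => (comps k (rem - j)).map (fun c => j :: c))

-- membership characterisation of comps (k ≥ 1)
theorem mem_comps (k : Int) (hk : 1 ≤ k) :
    ∀ (m : Nat) (x : List Int),
      x ∈ comps k (m : Int) ↔ x.sum = (m : Int) ∧ ∀ a ∈ x, 1 ≤ a ∧ a ≤ k := by
  intro m
  induction m using Nat.strong_induction_on with
  | _ m ih =>
  intro x
  by_cases hm : m = 0
  · subst hm
    rw [show ((0:Nat):Int) = 0 from rfl, comps, if_pos rfl]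
    simp only [List.mem_singleton]
    constructor
    · rintro rfl; exact ⟨rfl, by simp⟩
    · rintro ⟨hsum, hparts⟩
      cases x with
      | nil => rfl
      | cons a t =>
        exfalso
        have h1 := (hparts a (by simp)).1
        have h2 : (0:Int) ≤ t.sum :=
          List.sum_nonneg (fun b hb => by have := (hparts b (by simp [hb])).1; omega)
        simp only [List.sum_cons] at hsum
        omega
  · rw [comps_eq_flatMap k (m : Int) (by omega)]
    constructor
    · intro hx
      obtain ⟨j, hj, hx⟩ := List.mem_flatMap.mp hx
      obtain ⟨c, hc, rfl⟩ := List.mem_map.mp hx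
      have hj' := PySem.List.mem_pyRange_one.mp hj
      have hjm : j ≤ (m : Int) := by omega
      have hcast : (m : Int) - j = ((m - j.toNat : Nat) : Int) := by omega
      rw [hcast] at hc
      have hrec := (ih (m - j.toNat) (by omega) c).mp hc
      refine ⟨?_, ?_⟩
      · simp only [List.sum_cons]; omega
      · intro a ha
        rcases List.mem_cons.mp ha with rfl | ha
        · omega
        · exact hrec.2 a ha
    · rintro ⟨hsum, hparts⟩
      cases x with
      | nil => simp at hsum; omega
      | cons a t =>
        have ha := hparts a (by simp)
        have htpos : (0:Int) ≤ t.sum :=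
          List.sum_nonneg (fun b hb => by have := (hparts b (by simp [hb])).1; omega)
        simp only [List.sum_cons] at hsum
        refine List.mem_flatMap.mpr ⟨a, ?_, List.mem_map.mpr ⟨t, ?_, rfl⟩⟩
        · exact PySem.List.mem_pyRange_one.mpr ⟨by omega, by omega⟩
        · have hcast : (m : Int) - a = ((m - a.toNat : Nat) : Int) := by omega
          rw [hcast]
          exact (ih (m - a.toNat) (by omega) t).mpr
            ⟨by omega, fun b hb => hparts b (by simp [hb])⟩

-- comps is strictly increasing lexicographically (k ≥ 1)
theorem pairwise_comps (k : Int) (hk : 1 ≤ k) :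
    ∀ (m : Nat), (comps k (m : Int)).Pairwise (· < ·) := by
  intro m
  induction m using Nat.strong_induction_on with
  | _ m ih =>
  by_cases hm : m = 0
  · subst hm
    rw [show ((0:Nat):Int) = 0 from rfl, comps, if_pos rfl]
    simp
  · rw [comps_eq_flatMap k (m : Int) (by omega)]
    unfold List.flatMap
    apply List.pairwise_flatten.mpr
    constructor
    · intro l hl
      obtain ⟨j, hj, rfl⟩ := List.mem_map.mp hl
      have hj' := PySem.List.mem_pyRange_one.mp hj
      have hcast : (m : Int) - j = ((m - j.toNat : Nat) : Int) := by omega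
      rw [hcast]
      exact List.Pairwise.map _ (fun a b h => lt_cons_same h) (ih (m - j.toNat) (by omega))
    · apply List.pairwise_map.mpr
      apply (PySem.List.pairwise_lt_pyRange_one 1 (min k (m : Int) + 1)).imp
      intro j1 j2 hlt x hx y hy
      obtain ⟨c1, _, rfl⟩ := List.mem_map.mp hx
      obtain ⟨c2, _, rfl⟩ := List.mem_map.mp hy
      exact lt_cons_rel hlt c1 c2

-- reversing each table entry gives exactly comps (k ≥ 1)
theorem tbl_map_reverse (k : Int) (hk : 1 ≤ k) :
    ∀ (m : Nat), (tbl k m).map List.reverse = comps k (m : Int) := by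
  intro m
  induction m using Nat.strong_induction_on with
  | _ m ih =>
  match m with
  | 0 =>
    rw [show ((0:Nat):Int) = 0 from rfl, comps, if_pos rfl, tbl]
    rfl
  | 1 =>
    rw [tbl, comps_eq_flatMap k ((1:Nat):Int) (by norm_num)]
    have hmin : min k ((1:Nat):Int) = 1 := by push_cast; omega
    rw [hmin, PySem.List.pyRange_one_singleton]
    have h0 : comps k 0 = [[]] := by
      rw [comps, if_pos rfl]
    simp [h0]
  | (p + 2) =>
    rw [tbl, comps_eq_flatMap k ((p + 2 : Nat) : Int) (by push_cast; omega)]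
    have hcast : (((p:Nat) : Int) + 2) = ((p + 2 : Nat) : Int) := by push_cast; ring
    rw [hcast]
    rw [List.map_flatMap]
    have hbody : ∀ x ∈ (PySem.List.pyRange 1 (min k ((p + 2 : Nat) : Int) + 1) 1).attach,
        ((tbl k (p + 2 - x.1.toNat)).map (fun el => el ++ [x.1])).map List.reverse
          = (comps k (((p + 2 : Nat) : Int) - x.1)).map (fun c => x.1 :: c) := by
      rintro ⟨j, hj⟩ _
      have hj' := PySem.List.mem_pyRange_one.mp hj
      have hjm : j ≤ ((p + 2 : Nat) : Int) := by
        have : min k ((p + 2 : Nat) : Int) ≤ ((p + 2 : Nat) : Int) := min_le_right _ _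
        omega
      rw [List.map_map]
      rw [show (List.reverse ∘ fun el => el ++ [j]) = ((fun c => j :: c) ∘ List.reverse) from by
        funext el; simp]
      rw [← List.map_map, ih (p + 2 - j.toNat) (by omega)]
      rw [show ((p + 2 - j.toNat : Nat) : Int) = ((p + 2 : Nat) : Int) - j from by omega]
    have hcong : (PySem.List.pyRange 1 (min k ((p + 2 : Nat) : Int) + 1) 1).attach.flatMap
          (fun x => ((tbl k (p + 2 - x.1.toNat)).map (fun el => el ++ [x.1])).map List.reverse)
        = (PySem.List.pyRange 1 (min k ((p + 2 : Nat) : Int) + 1) 1).attach.flatMap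
          (fun x => (comps k (((p + 2 : Nat) : Int) - x.1)).map (fun c => x.1 :: c)) := by
      unfold List.flatMap
      rw [List.map_congr_left hbody]
    rw [hcong, flatMap_attach' (PySem.List.pyRange 1 (min k ((p + 2 : Nat) : Int) + 1) 1)
      (fun j => (comps k (((p + 2 : Nat) : Int) - j)).map (fun c => j :: c))]

-- A's table is a permutation of comps (k ≥ 1)
theorem tbl_perm_comps (k : Int) (hk : 1 ≤ k) (m : Nat) :
    (comps k (m : Int)).Perm (tbl k m) := by
  have htbl : tbl k m = (comps k (m : Int)).map List.reverse := by
    rw [← tbl_map_reverse k hk m, List.map_map]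
    simp
  rw [htbl]
  have hnodup : (comps k (m : Int)).Nodup :=
    (pairwise_comps k hk m).imp ne_of_lt
  apply (List.perm_ext_iff_of_nodup hnodup (hnodup.map (fun _ _ h => List.reverse_injective h))).mpr
  intro x
  rw [mem_comps k hk m x]
  constructor
  · rintro ⟨hsum, hparts⟩
    refine List.mem_map.mpr ⟨x.reverse, ?_, List.reverse_reverse x⟩
    rw [mem_comps k hk m]
    exact ⟨by rw [List.sum_reverse]; exact hsum, fun a ha => hparts a (List.mem_reverse.mp ha)⟩
  · intro hx
    obtain ⟨c, hc, rfl⟩ := List.mem_map.mp hx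
    rw [mem_comps k hk m] at hc
    exact ⟨by rw [List.sum_reverse]; exact hc.1, fun a ha => hc.2 a (List.mem_reverse.mp ha)⟩

-- B's DFS loop enumerates, for each stack entry top-down, its prefix followed by each
-- composition of its remaining height, appended after the results already collected.
theorem altLoop_eq (k : Int) :
    ∀ (stack : List (Int × List Int)) (res : List (List Int)),
      altLoop k stack res
        = res ++ stack.flatMap (fun p => (comps k p.1).map (fun c => p.2 ++ c)) := by
  intro stack res
  induction stack, res using altLoop.induct k with
  | case1 res => simp [altLoop]
  | case2 res pre rest ih =>
    rw [altLoop, if_pos rfl, ih, List.flatMap_cons]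
    rw [show comps k 0 = [[]] from by rw [comps, if_pos rfl]]
    simp
  | case3 res rem pre rest hrem ih =>
    rw [altLoop]
    simp only [if_neg hrem]
    rw [ih, foldl_cons_eq_reverse_append, PySem.List.pyRange_neg_one_eq_reverse,
        List.reverse_reverse, List.flatMap_append, List.flatMap_cons]
    congr 1
    rw [List.flatMap_map]
    have hmap : (comps k rem).map (fun c => pre ++ c)
        = (PySem.List.pyRange 1 (min k rem + 1) 1).flatMap
            (fun j => (comps k (rem - j)).map (fun c => pre ++ [j] ++ c)) := by
      rw [comps_eq_flatMap k rem hrem, List.map_flatMap]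
      congr 1
      funext j
      rw [List.map_map]
      congr 1
      funext c
      simp
    rw [hmap]
    rfl

-- B evaluated: for n ≠ 0, k ≠ 0 it returns comps k n
theorem alt_eval (n k : Int) (hn : n ≠ 0) (hk : k ≠ 0) :
    climbingStaircase_alt n k = comps k n := by
  rw [climbingStaircase_alt, if_neg hn, if_neg hk, altLoop_eq]
  simp

-- the inner Python loop of A: only key i changes, accumulating the flatMap
theorem inner_loop (i : Int) (js : List Int) (hjs : ∀ j ∈ js, 1 ≤ j) :
    ∀ (d : PySem.Dict Int (List (List Int))) (acc : List (List Int)),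
      d.get? i = some acc → ∀ (m : Int),
      (js.foldl (fun d j => d.insert i (d.getD i [] ++ (d.getD (i - j) []).map (fun el => el ++ [j]))) d).get? m
        = if m = i then
            some (acc ++ js.flatMap (fun j => ((d.get? (i - j)).getD []).map (fun el => el ++ [j])))
          else d.get? m := by
  induction js with
  | nil =>
    intro d acc hacc m
    simp only [List.foldl_nil, List.flatMap_nil, List.append_nil]
    split_ifs with hm
    · subst hm; exact hacc
    · rfl
  | cons j rest ih =>
    intro d acc hacc m
    have hj1 : 1 ≤ j := hjs j (by simp)
    have hrest : ∀ j' ∈ rest, 1 ≤ j' := fun j' hj' => hjs j' (by simp [hj'])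
    have hgd : d.getD i [] = acc := by
      rw [PySem.Dict.getD_eq_get?_getD, hacc]; rfl
    set v : List (List Int) := acc ++ ((d.get? (i - j)).getD []).map (fun el => el ++ [j]) with hv
    have hstep : (d.insert i (d.getD i [] ++ (d.getD (i - j) []).map (fun el => el ++ [j]))) =
        d.insert i v := by
      rw [hgd, hv, PySem.Dict.getD_eq_get?_getD]
    rw [List.foldl_cons, hstep]
    have hget' : (d.insert i v).get? i = some v := PySem.Dict.get?_insert_self d i v
    rw [ih hrest (d.insert i v) v hget' m]
    have hsame : ∀ j' ∈ rest,
        ((d.insert i v).get? (i - j')).getD [] = (d.get? (i - j')).getD [] := by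
      intro j' hj'
      rw [PySem.Dict.get?_insert_of_ne d v (by have := hrest j' hj'; omega)]
    have hfm : rest.flatMap (fun j' => (((d.insert i v).get? (i - j')).getD []).map (fun el => el ++ [j']))
        = rest.flatMap (fun j' => ((d.get? (i - j')).getD []).map (fun el => el ++ [j'])) := by
      unfold List.flatMap
      rw [List.map_congr_left (fun j' hj' => by rw [hsame j' hj'])]
    rw [hfm]
    split_ifs with hm
    · subst hm
      rw [List.flatMap_cons, hv, List.append_assoc]
    · exact PySem.Dict.get?_insert_of_ne d v hm

-- the outer Python loop of A: after processing 2..N the table holds tbl k m for every 0 ≤ m ≤ N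
theorem outer_loop (k : Int) (N : Nat) (hN : 1 ≤ N) :
    ∀ (m : Int),
      ((PySem.List.pyRange 2 ((N : Int) + 1) 1).foldl (fun d i =>
        (PySem.List.pyRange 1 (min k i + 1) 1).foldl
          (fun d j => d.insert i (d.getD i [] ++ (d.getD (i - j) []).map (fun el => el ++ [j])))
          (d.insert i [])) (PySem.Dict.ofList [(0, [[]]), (1, [[1]])])).get? m
      = if 0 ≤ m ∧ m ≤ (N : Int) then some (tbl k m.toNat) else none := by
  induction N, hN using Nat.le_induction with
  | base =>
    intro m
    rw [PySem.List.pyRange_one_eq_nil (by norm_num), List.foldl_nil]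
    have : PySem.Dict.ofList [((0:Int), ([[]] : List (List Int))), (1, [[1]])]
        = PySem.Dict.mk [(0, [[]]), (1, [[1]])] := rfl
    rw [this, PySem.Dict.get?_mk_cons, PySem.Dict.get?_mk_cons]
    by_cases h0 : m = 0
    · subst h0; norm_num [tbl]
    · by_cases h1 : m = 1
      · subst h1; norm_num [tbl]
      · have e0 : ((0:Int) == m) = false := beq_eq_false_iff_ne.mpr (by omega)
        have e1 : ((1:Int) == m) = false := beq_eq_false_iff_ne.mpr (by omega)
        rw [e0, e1]
        have hcond : ¬(0 ≤ m ∧ m ≤ ((1:Nat):Int)) := by push_cast; omega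
        simp only [Bool.false_eq_true, if_false, if_neg hcond]
        rfl
  | succ N hN ih =>
    intro m
    have hsplit : PySem.List.pyRange 2 ((N:Int) + 1 + 1) 1
        = PySem.List.pyRange 2 ((N:Int) + 1) 1 ++ [(N:Int) + 1] := by
      exact PySem.List.pyRange_one_succ_right (a := 2) (b := (N:Int) + 1) (by omega)
    push_cast
    rw [hsplit, List.foldl_append, List.foldl_cons, List.foldl_nil]
    set i : Int := (N:Int) + 1 with hi
    set dN := (PySem.List.pyRange 2 ((N : Int) + 1) 1).foldl (fun d i =>
        (PySem.List.pyRange 1 (min k i + 1) 1).foldl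
          (fun d j => d.insert i (d.getD i [] ++ (d.getD (i - j) []).map (fun el => el ++ [j])))
          (d.insert i [])) (PySem.Dict.ofList [(0, [[]]), (1, [[1]])]) with hdN
    have hjs : ∀ j ∈ PySem.List.pyRange 1 (min k i + 1) 1, 1 ≤ j := by
      intro j hj; exact (PySem.List.mem_pyRange_one.mp hj).1
    rw [inner_loop i (PySem.List.pyRange 1 (min k i + 1) 1) hjs (dN.insert i []) []
      (PySem.Dict.get?_insert_self dN i []) m]
    by_cases hm : m = i
    · subst hm
      have hcpos : 0 ≤ i ∧ i ≤ (N:Int) + 1 := by omega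
      rw [if_pos rfl, if_pos hcpos]
      congr 1
      rw [List.nil_append]
      have hval : ∀ j ∈ PySem.List.pyRange 1 (min k i + 1) 1,
          (((dN.insert i []).get? (i - j)).getD []).map (fun el => el ++ [j])
            = (tbl k (N + 1 - j.toNat)).map (fun el => el ++ [j]) := by
        intro j hj
        have hj' := PySem.List.mem_pyRange_one.mp hj
        have hj1 : 1 ≤ j := hj'.1
        have hjle : j ≤ i := by omega
        rw [PySem.Dict.get?_insert_of_ne dN [] (by omega : i - j ≠ i), ih (i - j)]
        rw [if_pos (by omega)]
        have : (i - j).toNat = N + 1 - j.toNat := by omega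
        rw [this, Option.getD_some]
      have htbl : tbl k (N + 1)
          = (PySem.List.pyRange 1 (min k i + 1) 1).flatMap
              (fun j => (tbl k (N + 1 - j.toNat)).map (fun el => el ++ [j])) := by
        rw [show N + 1 = (N - 1) + 2 from by omega, tbl]
        have hc2 : ((((N - 1 : Nat)):Int) + 2) = i := by push_cast [Nat.cast_sub hN]; omega
        rw [hc2]
        rw [flatMap_attach' (PySem.List.pyRange 1 (min k i + 1) 1)
          (fun j => (tbl k (N - 1 + 2 - j.toNat)).map (fun el => el ++ [j]))]
      have hiN : i.toNat = N + 1 := by omega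
      rw [hiN, htbl]
      unfold List.flatMap
      rw [List.map_congr_left hval]
    · rw [if_neg hm, PySem.Dict.get?_insert_of_ne dN [] hm, ih m]
      by_cases hc : 0 ≤ m ∧ m ≤ (N:Int)
      · rw [if_pos hc, if_pos ⟨hc.1, by omega⟩]
      · rw [if_neg hc, if_neg (fun h => hc (by omega))]

-- A evaluated: for positive n the returned list is the sorted table entry
theorem A_eval (n k : Int) (hn : n ≠ 0) (hk : k ≠ 0) (hpos : 1 ≤ n) :
    climbingStaircase n k = PySem.List.sorted (tbl k n.toNat) (fun x => x) false := by
  unfold climbingStaircase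
  rw [if_neg hn, if_neg hk]
  show PySem.List.sorted
    (((PySem.List.pyRange 2 (n + 1) 1).foldl (fun d i =>
        (PySem.List.pyRange 1 (min k i + 1) 1).foldl
          (fun d j => d.insert i (d.getD i [] ++ (d.getD (i - j) []).map (fun el => el ++ [j])))
          (d.insert i [])) (PySem.Dict.ofList [(0, [[]]), (1, [[1]])])).getD n [])
    (fun x => x) false = _
  have hlo := outer_loop k n.toNat (by omega) n
  rw [Int.toNat_of_nonneg (by omega : (0:Int) ≤ n)] at hlo
  rw [PySem.Dict.getD_eq_get?_getD, hlo, if_pos ⟨by omega, by omega⟩, Option.getD_some]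

-- the k < 0 table entries are empty for n ≥ 2
theorem tbl_empty_of_neg (k : Int) (hk : k < 0) (p : Nat) : tbl k (p + 2) = [] := by
  rw [tbl, PySem.List.pyRange_one_eq_nil (by omega)]
  rfl

-- ===== VERDICT (by name: the statement is the Claim_ definition above) =====
theorem climbingStaircase_spec : Claim_unchanged_climbingStaircase := by
  intro n k _ hPre hD
  show climbingStaircase n k = climbingStaircase_alt n k
  by_cases hn0 : n = 0
  · subst hn0
    unfold climbingStaircase climbingStaircase_alt
    rw [if_pos rfl, if_pos rfl]
  by_cases hk0 : k = 0
  · subst hk0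
    rw [climbingStaircase_alt, if_neg hn0, if_pos rfl]
    unfold climbingStaircase
    rw [if_neg hn0, if_pos rfl]
  have hn1 : 1 ≤ n := by rcases hPre with h | h <;> omega
  rw [A_eval n k hn0 hk0 hn1, alt_eval n k hn0 hk0]
  by_cases hkpos : 1 ≤ k
  · -- main case: the sorted table is exactly B's lexicographic enumeration
    have hperm := tbl_perm_comps k hkpos n.toNat
    have hpw := pairwise_comps k hkpos n.toNat
    rw [Int.toNat_of_nonneg (by omega : (0:Int) ≤ n)] at hperm hpw
    have h := PySem.List.sorted_eq_of_perm_of_pairwise_lt (tbl k n.toNat)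
      (comps k n) (fun x => x) hperm hpw
    convert h using 2
  · -- k < 0 (and n ≠ 1 since ¬D): both sides are []
    have hklt : k < 0 := by omega
    have hn2 : 2 ≤ n := by
      rcases (not_and_or.mp hD) with h | h
      · omega
      · omega
    obtain ⟨p, hp⟩ : ∃ p, n.toNat = p + 2 := ⟨n.toNat - 2, by omega⟩
    rw [hp, tbl_empty_of_neg k hklt p, comps_empty k n hn0 (by omega)]
    rfl

theorem climbingStaircase_changed : Claim_changed_climbingStaircase := by
  unfold Claim_changed_climbingStaircase
  refine ⟨by decide, by decide, by decide, by decide, ?_, by decide⟩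
  show climbingStaircase_alt 1 (-1) = []
  rw [alt_eval 1 (-1) (by omega) (by omega), comps_empty (-1) 1 (by omega) (by omega)]

theorem climbingStaircase_tight : Claim_exact_climbingStaircase := by
  intro n k _ _ hD
  obtain ⟨hn, hk⟩ := hD
  subst hn
  rw [alt_eval 1 k (by omega) (by omega), comps_empty k 1 (by omega) (by omega)]
  unfold climbingStaircase
  rw [if_neg (by omega), if_neg (by omega),
    PySem.List.pyRange_one_eq_nil (by omega)]
  simp only [List.foldl_nil]
  decide
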